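-- pv_equiv track=rewrite | github.com/apache/airavata-custos | ansible/ENV/lib/python3.6/site-packages/ansible_collections/fortinet/fortios/plugins/modules/fortios_alertemail_setting.py | filter_alertemail_setting_data
-- ===== SOURCE A (Python) =====
-- def filter_alertemail_setting_data(json):
--     option_list = ['admin_login_logs', 'alert_interval', 'amc_interface_bypass_mode',
--                    'antivirus_logs', 'configuration_changes_logs', 'critical_interval',
--                    'debug_interval', 'email_interval', 'emergency_interval',
--                    'error_interval', 'FDS_license_expiring_days', 'FDS_license_expiring_warning',
--                    'FDS_update_logs', 'filter_mode', 'FIPS_CC_errors',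
--                    'firewall_authentication_failure_logs', 'fortiguard_log_quota_warning', 'FSSO_disconnect_logs',
--                    'HA_logs', 'information_interval', 'IPS_logs',
--                    'IPsec_errors_logs', 'local_disk_usage', 'log_disk_usage_warning',
--                    'mailto1', 'mailto2', 'mailto3',
--                    'notification_interval', 'PPP_errors_logs', 'severity',
--                    'ssh_logs', 'sslvpn_authentication_errors_logs', 'username',
--                    'violation_traffic_logs', 'warning_interval', 'webfilter_logs']
--     dictionary = {}
--
--     for attribute in option_list:
--         if attribute in json and json[attribute] is not None:
--             dictionary[attribute] = json[attribute]
--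
--     return dictionary
-- ===== SOURCE B (Python) =====
-- _OPTION_LIST = ['admin_login_logs', 'alert_interval', 'amc_interface_bypass_mode',
--                 'antivirus_logs', 'configuration_changes_logs', 'critical_interval',
--                 'debug_interval', 'email_interval', 'emergency_interval',
--                 'error_interval', 'FDS_license_expiring_days', 'FDS_license_expiring_warning',
--                 'FDS_update_logs', 'filter_mode', 'FIPS_CC_errors',
--                 'firewall_authentication_failure_logs', 'fortiguard_log_quota_warning', 'FSSO_disconnect_logs',
--                 'HA_logs', 'information_interval', 'IPS_logs',
--                 'IPsec_errors_logs', 'local_disk_usage', 'log_disk_usage_warning',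
--                 'mailto1', 'mailto2', 'mailto3',
--                 'notification_interval', 'PPP_errors_logs', 'severity',
--                 'ssh_logs', 'sslvpn_authentication_errors_logs', 'username',
--                 'violation_traffic_logs', 'warning_interval', 'webfilter_logs']
--
-- _RANK = {k: i for i, k in enumerate(_OPTION_LIST)}
--
--
-- def filter_alertemail_setting_data(json):
--     # One pass over the input dict, keeping whitelisted non-None entries tagged
--     # with their whitelist rank, then a sort restores the whitelist order.
--     triples = [(_RANK[k], k, v) for k, v in json.items()
--                if k in _RANK and v is not None]
--     triples.sort(key=lambda t: t[0])
--     return {k: v for _, k, v in triples}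
-- ===== Notes on version B (the rewrite author's own statement) =====
-- stated objective: alternative
-- what changed: Instead of scanning the 36-key whitelist and probing the input dict for each key, B makes one pass over the input dict's items, keeps whitelisted non-None entries tagged with their precomputed whitelist rank, and sorts by rank to restore the whitelist output order.
import Mathlib
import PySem

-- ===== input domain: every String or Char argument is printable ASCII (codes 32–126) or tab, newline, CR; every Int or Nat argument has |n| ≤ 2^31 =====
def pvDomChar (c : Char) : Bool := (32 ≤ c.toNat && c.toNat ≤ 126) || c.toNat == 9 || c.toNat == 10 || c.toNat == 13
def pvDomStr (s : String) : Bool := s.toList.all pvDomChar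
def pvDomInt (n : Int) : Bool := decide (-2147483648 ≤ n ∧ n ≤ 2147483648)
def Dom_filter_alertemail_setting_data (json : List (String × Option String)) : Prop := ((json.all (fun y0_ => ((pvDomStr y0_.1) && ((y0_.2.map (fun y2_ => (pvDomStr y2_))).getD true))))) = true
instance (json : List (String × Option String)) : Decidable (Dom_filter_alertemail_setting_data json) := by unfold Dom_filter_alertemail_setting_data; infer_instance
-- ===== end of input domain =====

-- B filters with one pass over the input dict (rank-tagged by a precomputed whitelist-index dict, then sorted by rank)
-- instead of A's scan of the whitelist probing the dict; objective: alternative traversal, same result.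


set_option maxRecDepth 100000

-- ===== PORT A =====
def pvOptionList : List String :=
  ["admin_login_logs", "alert_interval", "amc_interface_bypass_mode",
   "antivirus_logs", "configuration_changes_logs", "critical_interval",
   "debug_interval", "email_interval", "emergency_interval",
   "error_interval", "FDS_license_expiring_days", "FDS_license_expiring_warning",
   "FDS_update_logs", "filter_mode", "FIPS_CC_errors",
   "firewall_authentication_failure_logs", "fortiguard_log_quota_warning", "FSSO_disconnect_logs",
   "HA_logs", "information_interval", "IPS_logs",
   "IPsec_errors_logs", "local_disk_usage", "log_disk_usage_warning",
   "mailto1", "mailto2", "mailto3",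
   "notification_interval", "PPP_errors_logs", "severity",
   "ssh_logs", "sslvpn_authentication_errors_logs", "username",
   "violation_traffic_logs", "warning_interval", "webfilter_logs"]

def filter_alertemail_setting_data (json : List (String × Option String)) : List (String × String) :=
  let jd : PySem.Dict String (Option String) := ⟨json⟩
  (pvOptionList.foldl (fun (d : PySem.Dict String String) attr =>
      if jd.contains attr then
        match jd.get? attr with
        | some (some v) => d.insert attr v
        | _ => d
      else d) PySem.Dict.empty).items

-- ===== PORT B =====
-- Source B's own _OPTION_LIST literal
def pvOptionListB : List String :=
  ["admin_login_logs", "alert_interval", "amc_interface_bypass_mode",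
   "antivirus_logs", "configuration_changes_logs", "critical_interval",
   "debug_interval", "email_interval", "emergency_interval",
   "error_interval", "FDS_license_expiring_days", "FDS_license_expiring_warning",
   "FDS_update_logs", "filter_mode", "FIPS_CC_errors",
   "firewall_authentication_failure_logs", "fortiguard_log_quota_warning", "FSSO_disconnect_logs",
   "HA_logs", "information_interval", "IPS_logs",
   "IPsec_errors_logs", "local_disk_usage", "log_disk_usage_warning",
   "mailto1", "mailto2", "mailto3",
   "notification_interval", "PPP_errors_logs", "severity",
   "ssh_logs", "sslvpn_authentication_errors_logs", "username",
   "violation_traffic_logs", "warning_interval", "webfilter_logs"]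

-- _RANK = {k: i for i, k in enumerate(_OPTION_LIST)}
def pvRank : PySem.Dict String Int :=
  (List.zipIdx pvOptionListB).foldl (fun (d : PySem.Dict String Int) p => d.insert p.1 (p.2 : Int)) PySem.Dict.empty

def filter_alertemail_setting_data_alt (json : List (String × Option String)) : List (String × String) :=
  let triples : List (Int × String × String) := json.foldl (fun acc kv =>
      match PySem.Dict.get? pvRank kv.1 with
      | some r =>
        match kv.2 with
        | some v => acc ++ [(r, kv.1, v)]
        | none => acc
      | none => acc) []
  let ts := PySem.List.sorted triples (fun t => t.1) false
  (ts.foldl (fun (d : PySem.Dict String String) t => d.insert t.2.1 t.2.2) PySem.Dict.empty).items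

-- ===== PRECONDITION & SPEC =====
-- Pre_ excludes association lists with duplicate keys: a Python dict cannot contain them, and on such
-- lists the result of either program is an artefact of the accidental list representation of the dict.
def Pre_filter_alertemail_setting_data (json : List (String × Option String)) : Prop :=
  (json.map Prod.fst).Nodup
instance (json : List (String × Option String)) : Decidable (Pre_filter_alertemail_setting_data json) := by
  unfold Pre_filter_alertemail_setting_data; infer_instance

def pvWitness_filter_alertemail_setting_data : (List (String × Option String)) :=
  [("mailto1", some "a@b.c"), ("severity", none), ("not_an_option", some "x")]

def Spec_filter_alertemail_setting_data (json : List (String × Option String)) (out : List (String × String)) : Prop := out = filter_alertemail_setting_data_alt json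
instance (json : List (String × Option String)) (out : List (String × String)) : Decidable (Spec_filter_alertemail_setting_data json out) := by unfold Spec_filter_alertemail_setting_data; infer_instance

-- ===== CLAIM (what is proved, stated in full; the proofs are below) =====
def Claim_equal_filter_alertemail_setting_data : Prop := ∀ (json : List (String × Option String)), Dom_filter_alertemail_setting_data json → Pre_filter_alertemail_setting_data json → Spec_filter_alertemail_setting_data json (filter_alertemail_setting_data json)

-- ===== LEMMAS AND PROOFS =====

-- A's per-attribute extraction: the pair A inserts for a whitelist key, if any.
def pvA (json : List (String × Option String)) (attr : String) : Option (String × String) :=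
  match PySem.Dict.get? (⟨json⟩ : PySem.Dict String (Option String)) attr with
  | some (some v) => some (attr, v)
  | _ => none

-- B's per-entry extraction: the rank-tagged triple B collects for an input entry, if any.
def pvG (kv : String × Option String) : Option (Int × String × String) :=
  match PySem.Dict.get? pvRank kv.1 with
  | some r =>
    match kv.2 with
    | some v => some (r, kv.1, v)
    | none => none
  | none => none

-- the triple list in whitelist order
def pvT (json : List (String × Option String)) : List (Int × String × String) :=
  pvOptionList.filterMap (fun attr =>
    match PySem.Dict.get? (⟨json⟩ : PySem.Dict String (Option String)) attr, PySem.Dict.get? pvRank attr with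
    | some (some v), some r => some (r, attr, v)
    | _, _ => none)

theorem pv_filterMap_sublist {α β : Type} (f : α → Option β) (h : α → β)
    (hf : ∀ a, f a = none ∨ f a = some (h a)) (l : List α) :
    List.Sublist (l.filterMap f) (l.map h) := by
  induction l with
  | nil => simp
  | cons a l ih =>
    rcases hf a with h0 | h0 <;> simp only [List.filterMap_cons, h0, List.map_cons]
    · exact ih.cons (h a)
    · exact ih.cons₂ (h a)

theorem pv_find_first (json : List (String × Option String))
    (hnd : (json.map Prod.fst).Nodup) (kv : String × Option String) (hm : kv ∈ json) :
    List.find? (fun p => p.1 == kv.1) json = some kv := by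
  induction json with
  | nil => simp at hm
  | cons p rest ih =>
    simp only [List.map_cons, List.nodup_cons] at hnd
    rcases List.mem_cons.mp hm with h | h
    · subst h; simp
    · have hk : kv.1 ∈ rest.map Prod.fst := List.mem_map_of_mem h
      have hne : (p.1 == kv.1) = false := by
        simp only [beq_eq_false_iff_ne]
        intro he; exact hnd.1 (he ▸ hk)
      rw [List.find?_cons_of_neg (by simp [hne]), ih hnd.2 h]

theorem pvA_fst (json : List (String × Option String)) (a : String) (t : String × String)
    (h : pvA json a = some t) : t.1 = a := by
  unfold pvA at h
  cases h1 : PySem.Dict.get? (⟨json⟩ : PySem.Dict String (Option String)) a <;> rw [h1] at h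
  · simp at h
  · rename_i y
    cases y with
    | none => simp at h
    | some v =>
      simp only [Option.some.injEq] at h
      subst h; rfl

theorem pvA_fold (json : List (String × Option String)) :
    ∀ (l : List String) (d : PySem.Dict String String),
      (∀ attr ∈ l, d.contains attr = false) → l.Nodup →
      (l.foldl (fun (d : PySem.Dict String String) attr =>
        if (⟨json⟩ : PySem.Dict String (Option String)).contains attr then
          match (⟨json⟩ : PySem.Dict String (Option String)).get? attr with
          | some (some v) => d.insert attr v
          | _ => d
        else d) d).items = d.items ++ l.filterMap (pvA json) := by
  intro l
  induction l with
  | nil => intro d _ _; simp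
  | cons a l ih =>
    intro d hnc hnd
    simp only [List.foldl_cons, List.filterMap_cons]
    have ha : d.contains a = false := hnc a (List.mem_cons_self ..)
    have hstep : ∀ (d' : PySem.Dict String String), d'.items = d.items ++ (pvA json a).toList →
        (l.foldl (fun (d : PySem.Dict String String) attr =>
          if (⟨json⟩ : PySem.Dict String (Option String)).contains attr then
            match (⟨json⟩ : PySem.Dict String (Option String)).get? attr with
            | some (some v) => d.insert attr v
            | _ => d
          else d) d').items = d.items ++ (pvA json a).toList ++ l.filterMap (pvA json) := by
      intro d' hd'
      rw [ih d' ?_ (List.nodup_cons.mp hnd).2, hd']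
      intro attr hattr
      have hne : (a == attr) = false := by
        simp only [beq_eq_false_iff_ne]
        intro he; exact (List.nodup_cons.mp hnd).1 (he ▸ hattr)
      have := hnc attr (List.mem_cons_of_mem _ hattr)
      simp only [PySem.Dict.contains] at this ⊢
      rw [hd']
      cases h0 : pvA json a with
      | none => simp [this]
      | some t =>
        have ht1 : t.1 = a := pvA_fst json a t h0
        have hane : ¬ a = attr := by simpa using hne
        simp [this, ht1, hane]
    by_cases hc : (⟨json⟩ : PySem.Dict String (Option String)).contains a
    · cases hg : (⟨json⟩ : PySem.Dict String (Option String)).get? a with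
      | none =>
        have hA : pvA json a = none := by simp [pvA, hg]
        simp only [hc, if_true]
        have := hstep d (by simp [hA])
        simpa [hA] using this
      | some y =>
        cases y with
        | none =>
          have hA : pvA json a = none := by simp [pvA, hg]
          simp only [hc, if_true]
          have := hstep d (by simp [hA])
          simpa [hA] using this
        | some v =>
          have hA : pvA json a = some (a, v) := by simp [pvA, hg]
          simp only [hc, if_true]
          have hins : (d.insert a v).items = d.items ++ [(a, v)] := by
            simp [PySem.Dict.insert, ha]
          have := hstep (d.insert a v) (by simp [hins, hA])
          simpa [hA] using this
    · have hA : pvA json a = none := by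
        have hg0 : (⟨json⟩ : PySem.Dict String (Option String)).get? a = none := by
          simp only [PySem.Dict.get?, Option.map_eq_none_iff, List.find?_eq_none]
          intro p hp hb
          exact hc (by
            simp only [PySem.Dict.contains, List.any_eq_true]
            exact ⟨p, hp, hb⟩)
        simp [pvA, hg0]
      simp only [if_neg hc]
      have := hstep d (by simp [hA])
      simpa [hA] using this

theorem pvB_fold (json : List (String × Option String)) :
    ∀ (acc : List (Int × String × String)),
      json.foldl (fun acc kv =>
        match PySem.Dict.get? pvRank kv.1 with
        | some r =>
          match kv.2 with
          | some v => acc ++ [(r, kv.1, v)]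
          | none => acc
        | none => acc) acc = acc ++ json.filterMap pvG := by
  induction json with
  | nil => intro acc; simp
  | cons kv rest ih =>
    intro acc
    simp only [List.foldl_cons, List.filterMap_cons]
    cases h1 : PySem.Dict.get? pvRank kv.1 <;> cases h2 : kv.2 <;>
      simp [pvG, h1, h2, ih, List.append_assoc]

theorem pvBuild_fold :
    ∀ (ts : List (Int × String × String)) (d : PySem.Dict String String),
      (∀ t ∈ ts, d.contains t.2.1 = false) → (ts.map (fun t => t.2.1)).Nodup →
      (ts.foldl (fun (d : PySem.Dict String String) t => d.insert t.2.1 t.2.2) d).items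
        = d.items ++ ts.map (fun t => (t.2.1, t.2.2)) := by
  intro ts
  induction ts with
  | nil => intro d _ _; simp
  | cons t ts ih =>
    intro d hnc hnd
    simp only [List.map_cons, List.nodup_cons] at hnd
    simp only [List.foldl_cons, List.map_cons]
    have ht : d.contains t.2.1 = false := hnc t (List.mem_cons_self ..)
    have hins : (d.insert t.2.1 t.2.2).items = d.items ++ [(t.2.1, t.2.2)] := by
      simp [PySem.Dict.insert, ht]
    rw [ih (d.insert t.2.1 t.2.2) ?_ hnd.2, hins]
    · simp
    · intro u hu
      have hne : (t.2.1 == u.2.1) = false := by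
        simp only [beq_eq_false_iff_ne]
        intro he; exact hnd.1 (he ▸ List.mem_map_of_mem hu)
      have := hnc u (List.mem_cons_of_mem _ hu)
      simp only [PySem.Dict.contains] at this ⊢
      rw [hins]
      simp [this, hne]

theorem pvRank_keys : pvRank.items.map Prod.fst = pvOptionList := by decide

theorem pvRank_all_some : pvOptionList.all (fun a => (PySem.Dict.get? pvRank a).isSome) = true := by decide

theorem pvRank_pairwise :
    pvOptionList.Pairwise (fun a b =>
      (PySem.Dict.get? pvRank a).getD 0 < (PySem.Dict.get? pvRank b).getD 0) := by decide

theorem pvT_pairwise (json : List (String × Option String)) :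
    (pvT json).Pairwise (fun s t => s.1 < t.1) := by
  unfold pvT
  rw [List.pairwise_filterMap]
  refine List.Pairwise.imp ?_ pvRank_pairwise
  intro a b hab t ht t' ht'
  cases h1 : PySem.Dict.get? (⟨json⟩ : PySem.Dict String (Option String)) a <;>
    rw [h1] at ht
  case none => simp at ht
  case some y =>
    cases y with
    | none => simp at ht
    | some v =>
      cases h2 : PySem.Dict.get? pvRank a <;> rw [h2] at ht
      case none => simp at ht
      case some r =>
        cases h3 : PySem.Dict.get? (⟨json⟩ : PySem.Dict String (Option String)) b <;>
          rw [h3] at ht'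
        case none => simp at ht'
        case some y' =>
          cases y' with
          | none => simp at ht'
          | some v' =>
            cases h4 : PySem.Dict.get? pvRank b <;> rw [h4] at ht'
            case none => simp at ht'
            case some r' =>
              simp only [Option.some.injEq] at ht ht'
              subst ht; subst ht'
              simpa [h2, h4] using hab

theorem pvG_none_or (kv : String × Option String) :
    pvG kv = none ∨ ∃ r v, pvG kv = some (r, kv.1, v) := by
  unfold pvG
  cases h1 : PySem.Dict.get? pvRank kv.1 <;> cases h2 : kv.2 <;> simp

theorem pvSorted_eq (json : List (String × Option String))
    (hnd : (json.map Prod.fst).Nodup) :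
    PySem.List.sorted (json.filterMap pvG) (fun t => t.1) false = pvT json := by
  have hpw := pvT_pairwise json
  apply PySem.List.sorted_eq_of_perm_of_pairwise_lt _ _ _ ?_ hpw
  have hndT : (pvT json).Nodup :=
    hpw.imp (fun h he => absurd (he ▸ h) (lt_irrefl _))
  have hndG : (json.filterMap pvG).Nodup := by
    have hsub : List.Sublist ((json.filterMap pvG).map (fun t => t.2.1)) (json.map Prod.fst) := by
      rw [List.map_filterMap]
      apply pv_filterMap_sublist _ Prod.fst
      intro kv
      rcases pvG_none_or kv with h | ⟨r, v, h⟩ <;> simp [h]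
    exact (hsub.nodup hnd).of_map
  rw [List.perm_ext_iff_of_nodup hndT hndG]
  intro x
  unfold pvT
  simp only [List.mem_filterMap]
  constructor
  · rintro ⟨a, ha, hFa⟩
    cases h1 : PySem.Dict.get? (⟨json⟩ : PySem.Dict String (Option String)) a <;>
      rw [h1] at hFa
    case none => simp at hFa
    case some y =>
      cases y with
      | none => simp at hFa
      | some v =>
        cases h2 : PySem.Dict.get? pvRank a <;> rw [h2] at hFa
        case none => simp at hFa
        case some r =>
          simp only [Option.some.injEq] at hFa
          subst hFa
          simp only [PySem.Dict.get?, Option.map_eq_some_iff] at h1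
          obtain ⟨p, hp, hp2⟩ := h1
          have hpa : p.1 = a := by
            have := List.find?_some hp
            simpa using this
          have hpm : p ∈ json := List.mem_of_find?_eq_some hp
          refine ⟨p, hpm, ?_⟩
          simp [pvG, hpa, hp2, h2]
  · rintro ⟨kv, hkv, hg⟩
    unfold pvG at hg
    cases h2 : PySem.Dict.get? pvRank kv.1 <;> rw [h2] at hg
    case none => simp at hg
    case some r =>
      cases h3 : kv.2 <;> rw [h3] at hg
      case none => simp at hg
      case some v =>
        simp only [Option.some.injEq] at hg
        subst hg
        have hmem : kv.1 ∈ pvOptionList := by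
          rw [← pvRank_keys]
          simp only [PySem.Dict.get?, Option.map_eq_some_iff] at h2
          obtain ⟨p, hp, _⟩ := h2
          have hpa : p.1 = kv.1 := by simpa using List.find?_some hp
          exact hpa ▸ List.mem_map_of_mem (List.mem_of_find?_eq_some hp)
        refine ⟨kv.1, hmem, ?_⟩
        have hfind : PySem.Dict.get? (⟨json⟩ : PySem.Dict String (Option String)) kv.1
            = some (some v) := by
          simp only [PySem.Dict.get?]
          rw [pv_find_first json hnd kv hkv]
          simp [h3]
        rw [hfind, h2]

theorem pvOptionList_nodup : pvOptionList.Nodup := by decide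

theorem pvA_eq_proj (json : List (String × Option String)) :
    pvOptionList.filterMap (pvA json) = (pvT json).map (fun t => (t.2.1, t.2.2)) := by
  unfold pvT
  rw [List.map_filterMap]
  apply List.filterMap_congr
  intro a ha
  have hsome : (PySem.Dict.get? pvRank a).isSome := by
    have := pvRank_all_some
    simp only [List.all_eq_true] at this
    exact this a ha
  obtain ⟨r, hr⟩ := Option.isSome_iff_exists.mp hsome
  cases h1 : PySem.Dict.get? (⟨json⟩ : PySem.Dict String (Option String)) a
  · simp [pvA, h1]
  · rename_i y
    cases y <;> simp [pvA, h1, hr]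

theorem pvT_keys_nodup (json : List (String × Option String)) :
    ((pvT json).map (fun t => t.2.1)).Nodup := by
  have hsub : List.Sublist ((pvT json).map (fun t => t.2.1)) pvOptionList := by
    have : pvOptionList.map id = pvOptionList := List.map_id pvOptionList
    rw [← this]
    unfold pvT
    rw [List.map_filterMap]
    apply pv_filterMap_sublist _ id
    intro a
    cases h1 : PySem.Dict.get? (⟨json⟩ : PySem.Dict String (Option String)) a
    · simp
    · rename_i y
      cases y with
      | none => simp
      | some v =>
        cases h2 : PySem.Dict.get? pvRank a <;> simp
  exact hsub.nodup pvOptionList_nodup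

-- ===== VERDICT (by name: the statement is the Claim_ definition above) =====
theorem filter_alertemail_setting_data_spec : Claim_equal_filter_alertemail_setting_data := by
  intro json _ hnd
  unfold Spec_filter_alertemail_setting_data
  unfold filter_alertemail_setting_data filter_alertemail_setting_data_alt
  simp only []
  rw [pvA_fold json pvOptionList PySem.Dict.empty (fun _ _ => rfl) pvOptionList_nodup]
  rw [pvB_fold json [], List.nil_append]
  rw [pvSorted_eq json hnd]
  rw [pvBuild_fold (pvT json) PySem.Dict.empty (fun _ _ => rfl) (pvT_keys_nodup json)]
  rw [pvA_eq_proj json]
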